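-- pv_equiv track=rewrite | github.com/jdabrante/1-DAW | Programacion/ut5/repaso/tic-tac-toe-checker.py | analyze_column
-- ===== SOURCE A (Python) =====
-- def analyze_column(board):
--     col_dict = {}
--     for line in board:
--         for i, mark in enumerate(line):
--             if i not in col_dict:
--                 col_dict[i] = [mark]
--             else:
--                 col_dict[i].append(mark)
--     for col in col_dict.values():
--         if col.count(1) == len(col):
--             return 1
--         elif col.count(2) == len(col):
--             return 2
--     return -1
-- ===== SOURCE B (Python) =====
-- def analyze_column(board):
--     width = max((len(line) for line in board), default=0)
--     for i in range(width):
--         column = [line[i] for line in board if i < len(line)]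
--         if all(m == 1 for m in column):
--             return 1
--         if all(m == 2 for m in column):
--             return 2
--     return -1
-- ===== Notes on version B (the rewrite author's own statement) =====
-- stated objective: simpler
-- what changed: B drops A's build-a-dict-of-columns phase entirely: it computes the board width and, in a single index-driven pass, extracts and tests each column directly from the rows (ragged rows filtered by i < len(line)).
import Mathlib
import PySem

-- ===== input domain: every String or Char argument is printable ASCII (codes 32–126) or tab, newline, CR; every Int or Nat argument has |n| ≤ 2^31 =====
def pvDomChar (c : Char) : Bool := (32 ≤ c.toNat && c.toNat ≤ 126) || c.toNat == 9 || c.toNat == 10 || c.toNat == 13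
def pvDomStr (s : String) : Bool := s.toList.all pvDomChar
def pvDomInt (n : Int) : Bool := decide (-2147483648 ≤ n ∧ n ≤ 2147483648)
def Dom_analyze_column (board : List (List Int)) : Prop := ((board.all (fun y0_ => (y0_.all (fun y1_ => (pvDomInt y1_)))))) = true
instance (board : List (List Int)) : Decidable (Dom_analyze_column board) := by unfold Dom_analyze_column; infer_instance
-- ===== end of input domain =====

-- B drops A's group-into-a-dict phase: it computes the board width and checks each column
-- directly by indexed access in one index-driven pass (objective: simpler).

-- ===== PORT A =====
-- body of A's inner loop: if i not in col_dict: col_dict[i] = [mark] else: col_dict[i].append(mark)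
def aStep (d : PySem.Dict Int (List Int)) (p : Int × Int) : PySem.Dict Int (List Int) :=
  if d.contains p.1 = false then d.insert p.1 [p.2]
  else d.insert p.1 (d.getD p.1 [] ++ [p.2])

-- A's second loop: for col in col_dict.values(): ... (early return)
def aCheck : List (List Int) → Int
  | [] => -1
  | col :: rest =>
    if PySem.List.count col 1 = col.length then 1
    else if PySem.List.count col 2 = col.length then 2
    else aCheck rest

def analyze_column (board : List (List Int)) : Int :=
  let col_dict := board.foldl
    (fun d line => (PySem.List.enumerate line).foldl (fun d p => aStep d p) d)
    PySem.Dict.empty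
  aCheck col_dict.values

-- ===== PORT B =====
-- column = [line[i] for line in board if i < len(line)]
def bColumn (board : List (List Int)) (i : Int) : List Int :=
  (board.filter (fun line => decide (i < (line.length : Int)))).map
    (fun line => PySem.List.pyGetD line i 0)

-- B's loop: for i in range(width): ... (early return)
def bScan (board : List (List Int)) : List Int → Int
  | [] => -1
  | i :: rest =>
    let column := bColumn board i
    if column.all (fun m => m == 1) then 1
    else if column.all (fun m => m == 2) then 2
    else bScan board rest

def analyze_column_alt (board : List (List Int)) : Int :=
  let width := PySem.List.maxD (board.map (fun line => (line.length : Int))) (fun y => y) 0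
  bScan board (PySem.List.pyRange 0 width 1)

-- ===== PRECONDITION & SPEC =====
def Spec_analyze_column (board : List (List Int)) (out : Int) : Prop := out = analyze_column_alt board
instance (board : List (List Int)) (out : Int) : Decidable (Spec_analyze_column board out) := by unfold Spec_analyze_column; infer_instance

-- ===== CLAIM (what is proved, stated in full; the proofs are below) =====
def Claim_equal_analyze_column : Prop := ∀ (board : List (List Int)), Dom_analyze_column board → Spec_analyze_column board (analyze_column board)

-- ===== LEMMAS AND PROOFS =====

-- [0, 1, ..., n-1] as Int keys (the keys A's dict holds, in insertion order)
def castRange (n : Nat) : List Int := List.map (fun k : Nat => (k : Int)) (List.range n)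

-- the width of the board (running max of the row lengths)
def Wb (board : List (List Int)) : Nat := (board.map List.length).foldl max 0

-- the column at index c exactly as A's dict accumulates it
def colOf (board : List (List Int)) (c : Int) : List Int :=
  board.flatMap (fun line => if 0 ≤ c then (getElem? line c.toNat).toList else [])

theorem aStep_eq : aStep = fun (d : PySem.Dict Int (List Int)) p => d.modify p.1 [] (fun col => col ++ [p.2]) := by
  funext d p
  simp [aStep, PySem.Dict.modify, PySem.Dict.getD_eq_get?_getD, PySem.Dict.contains_eq_isSome_get?]
  cases d.get? p.1 <;> simp

theorem filt_enum (line : List Int) (s c : Int) :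
    ((PySem.List.enumerate line s).filter (fun p => p.1 == c)).map (fun p => p.2)
      = if s ≤ c then (getElem? line (c - s).toNat).toList else [] := by
  induction line generalizing s with
  | nil => simp [PySem.List.enumerate]
  | cons x xs ih =>
    rw [PySem.List.enumerate_cons]
    by_cases hsc : s = c
    · subst hsc
      have h2 : ¬ (s + 1 ≤ s) := by omega
      simp [ih (s+1), h2]
    · have := ih (s + 1)
      by_cases hle : s ≤ c
      · have h1 : s + 1 ≤ c := by omega
        have h2 : (c - s).toNat = (c - (s+1)).toNat + 1 := by omega
        simp [hsc, this, h1, hle, h2]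
      · have h1 : ¬ (s + 1 ≤ c) := by omega
        simp [hsc, this, h1, hle]

theorem getD_fill (board : List (List Int)) (d : PySem.Dict Int (List Int)) (c : Int) :
    (board.foldl (fun d line => (PySem.List.enumerate line).foldl
        (fun d p => d.modify p.1 [] (fun col => col ++ [p.2])) d) d).getD c []
      = d.getD c [] ++ colOf board c := by
  induction board generalizing d with
  | nil => simp [colOf]
  | cons line rest ih =>
    rw [List.foldl_cons, ih, PySem.Dict.getD_foldl_modify_append, filt_enum line 0 c]
    simp [colOf, List.append_assoc]

theorem nodup_castRange (n : Nat) : (castRange n).Nodup := by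
  unfold castRange
  exact List.Nodup.map (fun a b h => by exact_mod_cast h) List.nodup_range

theorem mem_castRange (n : Nat) (y : Int) : y ∈ castRange n ↔ 0 ≤ y ∧ y < (n : Int) := by
  unfold castRange
  constructor
  · rintro h
    simp at h
    obtain ⟨k, hk, rfl⟩ := h
    omega
  · rintro ⟨h0, hn⟩
    simp
    exact ⟨y.toNat, by omega, by omega⟩

theorem castRange_split (w m : Nat) (h : w ≤ m) :
    castRange m = castRange w ++ List.map (fun k : Nat => (k : Int)) ((List.range (m - w)).map (w + ·)) := by
  unfold castRange
  rw [show m = w + (m - w) by omega, List.range_add, List.map_append]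
  simp [h]

theorem update_castRange (w l : Nat) :
    PySem.Set.update (castRange w) (castRange l) = castRange (max w l) := by
  by_cases h : l ≤ w
  · rw [max_eq_left h, PySem.Set.update_eq_append_filter]
    have : (PySem.Set.ofList (castRange l)).filter (fun y => !(PySem.Set.contains (castRange w) y)) = [] := by
      rw [PySem.Set.ofList_eq_self_of_nodup (castRange l) (nodup_castRange l)]
      apply List.filter_eq_nil_iff.mpr
      intro y hy
      have := (mem_castRange l y).mp hy
      simp [PySem.Set.contains_eq_listContains]
      exact (mem_castRange w y).mpr ⟨by omega, by omega⟩
    rw [this, List.append_nil]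
  · have hw : w ≤ l := by omega
    rw [max_eq_right hw, castRange_split w l hw, PySem.Set.update_append]
    have h1 : PySem.Set.update (castRange w) (castRange w) = castRange w := by
      rw [PySem.Set.update_eq_append_filter, PySem.Set.ofList_eq_self_of_nodup (castRange w) (nodup_castRange w)]
      have : (castRange w).filter (fun y => !(PySem.Set.contains (castRange w) y)) = [] := by
        apply List.filter_eq_nil_iff.mpr
        intro y hy
        simp at hy ⊢
        exact hy
      rw [this, List.append_nil]
    rw [h1, PySem.Set.update_eq_append_of_disjoint]
    · refine List.Nodup.map (fun a b hab => by exact_mod_cast hab) ?_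
      exact List.Nodup.map (fun a b hab => by omega) List.nodup_range
    · intro x hx
      simp at hx
      obtain ⟨k, hk, rfl⟩ := hx
      rw [mem_castRange]
      omega

theorem keys_fill (board : List (List Int)) (d : PySem.Dict Int (List Int)) (w : Nat)
    (hd : d.keys = castRange w) :
    (board.foldl (fun d line => (PySem.List.enumerate line).foldl
        (fun d p => d.modify p.1 [] (fun col => col ++ [p.2])) d) d).keys
      = castRange ((board.map List.length).foldl max w) := by
  induction board generalizing d w with
  | nil => simpa using hd
  | cons line rest ih =>
    rw [List.foldl_cons]
    rw [ih _ (max w line.length)]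
    · simp
    · rw [PySem.Dict.keys_foldl_modify_key, PySem.List.map_fst_enumerate, hd]
      rw [show (0 : Int) + line.length = ((line.length : Nat) : Int) by omega]
      rw [PySem.List.pyRange_zero_nat]
      rw [show List.map (fun k : Nat => (k : Int)) (List.range line.length) = castRange line.length from rfl]
      exact update_castRange w line.length

theorem values_fill (board : List (List Int)) :
    (board.foldl (fun d line => (PySem.List.enumerate line).foldl
        (fun d p => d.modify p.1 [] (fun col => col ++ [p.2])) d) PySem.Dict.empty).values
      = List.map (fun k : Nat => colOf board (k : Int)) (List.range (Wb board)) := by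
  have hkeys := keys_fill board PySem.Dict.empty 0 (by simp [castRange])
  have hnd : ((board.foldl (fun d line => (PySem.List.enumerate line).foldl
        (fun d p => d.modify p.1 [] (fun col => col ++ [p.2])) d) PySem.Dict.empty)).keys.Nodup := by
    rw [hkeys]; exact nodup_castRange _
  rw [PySem.Dict.values_eq_map_keys _ hnd [], hkeys]
  unfold castRange Wb
  rw [List.map_map]
  apply List.map_congr_left
  intro k hk
  simp only [Function.comp]
  rw [getD_fill]
  simp

theorem colOf_eq_bColumn (board : List (List Int)) (k : Nat) :
    colOf board (k : Int) = bColumn board (k : Int) := by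
  induction board with
  | nil => rfl
  | cons line rest ih =>
    unfold colOf bColumn at *
    rw [List.flatMap_cons, ih, List.filter_cons]
    have ht : ((k : Int)).toNat = k := by omega
    by_cases h : k < line.length
    · have h' : ((k : Int) < (line.length : Int)) := by exact_mod_cast h
      simp [h', ht, PySem.List.pyGetD_natCast, List.getD, List.getElem?_eq_getElem h]
    · have h' : ¬ ((k : Int) < (line.length : Int)) := by exact_mod_cast h
      have hg : getElem? line k = none := by
        apply List.getElem?_eq_none
        omega
      simp [h', ht, hg]

theorem count_iff_all (col : List Int) (c : Int) :
    (PySem.List.count col c = col.length) ↔ (col.all (fun m => m == c) = true) := by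
  rw [show PySem.List.count col c = List.count c col from rfl]
  rw [List.count_eq_length, List.all_eq_true]
  constructor
  · intro h m hm
    rw [beq_iff_eq]
    exact (h m hm).symm
  · intro h m hm
    have := h m hm
    rw [beq_iff_eq] at this
    exact this.symm

theorem scan_eq (board : List (List Int)) (ks : List Nat) :
    aCheck (List.map (fun k : Nat => colOf board (k : Int)) ks)
      = bScan board (List.map (fun k : Nat => (k : Int)) ks) := by
  induction ks with
  | nil => rfl
  | cons k ks ih =>
    simp only [List.map_cons, aCheck, bScan]
    rw [colOf_eq_bColumn]
    by_cases h1 : ((bColumn board (k : Int)).all (fun m => m == 1)) = true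
    · rw [if_pos ((count_iff_all _ 1).mpr h1), if_pos h1]
    · rw [if_neg (fun hc => h1 ((count_iff_all _ 1).mp hc)), if_neg h1]
      by_cases h2 : ((bColumn board (k : Int)).all (fun m => m == 2)) = true
      · rw [if_pos ((count_iff_all _ 2).mpr h2), if_pos h2]
      · rw [if_neg (fun hc => h2 ((count_iff_all _ 2).mp hc)), if_neg h2]
        exact ih

theorem foldl_max_cast (ns : List Nat) (w : Nat) :
    List.foldl max ((w : Int)) (List.map (fun n : Nat => (n : Int)) ns)
      = ((ns.foldl max w : Nat) : Int) := by
  induction ns generalizing w with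
  | nil => rfl
  | cons n ns ih =>
    rw [List.map_cons, List.foldl_cons, List.foldl_cons]
    rw [show max ((w : Int)) ((n : Int)) = ((max w n : Nat) : Int) by push_cast; rfl]
    exact ih (max w n)

theorem maxD_eq (board : List (List Int)) :
    PySem.List.maxD (board.map (fun line => (line.length : Int))) (fun y => y) 0
      = ((Wb board : Nat) : Int) := by
  unfold Wb PySem.List.maxD
  cases board with
  | nil => rfl
  | cons line rest =>
    simp only [List.map_cons, PySem.List.max?_id_cons, Option.getD_some, List.foldl_cons]
    have hrw : (List.map (fun line : List Int => (line.length : Int)) rest)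
         = List.map (fun n : Nat => (n : Int)) (List.map List.length rest) := by
      simp [List.map_map, Function.comp]
    rw [hrw, foldl_max_cast]
    simp

-- ===== VERDICT (by name: the statement is the Claim_ definition above) =====
theorem analyze_column_spec : Claim_equal_analyze_column := by
  intro board _
  unfold Spec_analyze_column analyze_column analyze_column_alt
  simp only [aStep_eq]
  rw [values_fill, maxD_eq, PySem.List.pyRange_zero_nat]
  exact scan_eq board (List.range (Wb board))
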